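-- pv_equiv track=rewrite | github.com/shenanigansd/scratchpad | events/advent_of_code/2022/10/python/aoc_2022_10.py | run_cycles
-- ===== SOURCE A (Python) =====
-- def run_cycles(text: str) -> dict[int, int]:
--     cycles = {}
--     lines = text.splitlines()
--     cycle = 1
--     x = 1
--     for line in lines:
--         match line.split():
--             case ["noop"]:
--                 cycle += 1
--                 cycles[cycle] = x
--             case ["addx", number]:
--                 cycle += 1
--                 cycles[cycle] = x
--                 cycle += 1
--                 x += int(number)
--                 cycles[cycle] = x
--     return cycles
-- ===== SOURCE B (Python) =====
-- def run_cycles(text: str) -> dict[int, int]: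
--     # Pass 1: translate the program into per-cycle deltas of the X register
--     # (noop -> one cycle with delta 0, addx V -> a 0-delta cycle then a V-delta cycle).
--     deltas = []
--     for line in text.splitlines():
--         parts = line.split()
--         if parts == ["noop"]:
--             deltas.append(0)
--         elif len(parts) == 2 and parts[0] == "addx":
--             deltas += [0, int(parts[1])]
--     # Pass 2: prefix-sum the deltas from X=1; the value after cycle i lands at key i+2.
--     x = 1
--     cycles = {}
--     for cycle, d in enumerate(deltas, start=2):
--         x += d
--         cycles[cycle] = x
--     return cycles
-- ===== Notes on version B (the rewrite author's own statement) =====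
-- stated objective: alternative
-- what changed: B replaces A's single stateful simulation (running cycle counter, running X, dict built in-flight) by a compile-then-accumulate scheme: pass 1 translates the program into a flat list of per-cycle deltas (0 for noop, 0 then V for addx), pass 2 prefix-sums the deltas from X=1 and keys the running sum at consecutive cycles from 2.
import Mathlib
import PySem

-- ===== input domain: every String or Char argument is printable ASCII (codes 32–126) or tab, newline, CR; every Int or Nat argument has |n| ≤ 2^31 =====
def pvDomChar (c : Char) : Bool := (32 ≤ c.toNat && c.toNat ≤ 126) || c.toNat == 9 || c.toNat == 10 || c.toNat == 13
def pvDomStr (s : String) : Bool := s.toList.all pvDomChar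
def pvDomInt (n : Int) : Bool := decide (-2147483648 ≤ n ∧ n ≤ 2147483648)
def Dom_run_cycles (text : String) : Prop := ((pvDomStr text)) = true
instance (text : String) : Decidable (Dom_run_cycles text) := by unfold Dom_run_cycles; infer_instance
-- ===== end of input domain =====

-- AoC 2022/10: B replaces A's in-flight simulation by a compile-then-accumulate scheme
-- (per-cycle delta list, then a prefix sum keyed at consecutive cycles from 2).

-- ===== PORT A =====
-- one iteration of A's for-loop over (cycles, cycle, x)
def runStepA (s : PySem.Dict Int Int × Int × Int) (line : String) :
    PySem.Dict Int Int × Int × Int :=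
  match PySem.Str.split₀ line with
  | [w] =>
      if w = "noop" then (s.1.insert (s.2.1 + 1) s.2.2, s.2.1 + 1, s.2.2)
      else s
  | [w, number] =>
      if w = "addx" then
        match PySem.Int.ofStr? number with
        | some n =>
            ((s.1.insert (s.2.1 + 1) s.2.2).insert (s.2.1 + 2) (s.2.2 + n),
             s.2.1 + 2, s.2.2 + n)
        | none =>            -- Python raises ValueError here (excluded by Pre_run_cycles);
                             -- the cycle increment and insert have already happened
            (s.1.insert (s.2.1 + 1) s.2.2, s.2.1 + 1, s.2.2)
      else s
  | _ => s

def run_cycles (text : String) : List (Int × Int) :=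
  ((PySem.Str.splitlines text).foldl runStepA (PySem.Dict.empty, 1, 1)).1.items

-- ===== PORT B =====
-- pass 1: the per-cycle delta list (0 for noop, 0 then V for addx; other lines skipped)
def deltasB : List String → List Int
  | [] => []
  | line :: rest =>
      let parts := PySem.Str.split₀ line
      if parts = ["noop"] then 0 :: deltasB rest
      else
        match parts with
        | [w, number] =>
            if w = "addx" then
              match PySem.Int.ofStr? number with
              | some n => 0 :: n :: deltasB rest
              | none => deltasB rest   -- Python raises ValueError here; excluded by Pre_run_cycles
            else deltasB rest
        | _ => deltasB rest

-- pass 2: prefix-sum the deltas from x, keying the running sum at cycles k, k+1, …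
-- (each dict key is fresh, so the dict in insertion order is exactly this list)
def accumB (k x : Int) : List Int → List (Int × Int)
  | [] => []
  | d :: ds => (k, x + d) :: accumB (k + 1) (x + d) ds

def run_cycles_alt (text : String) : List (Int × Int) :=
  accumB 2 1 (deltasB (PySem.Str.splitlines text))

-- ===== PRECONDITION & SPEC =====
-- a line on which the Python does not raise: any 'addx' line carries a valid int literal
def preLine (line : String) : Bool :=
  match PySem.Str.split₀ line with
  | [w, number] => w != "addx" || (PySem.Int.ofStr? number).isSome
  | _ => true

-- Pre_ excludes exactly the inputs where both Pythons raise ValueError (int() on a bad literal)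
def Pre_run_cycles (text : String) : Prop :=
  (PySem.Str.splitlines text).all preLine = true
instance (text : String) : Decidable (Pre_run_cycles text) := by
  unfold Pre_run_cycles; infer_instance

def pvWitness_run_cycles : String := "noop\naddx 3\nnoop\naddx -5"

def Spec_run_cycles (text : String) (out : List (Int × Int)) : Prop := out = run_cycles_alt text
instance (text : String) (out : List (Int × Int)) : Decidable (Spec_run_cycles text out) := by unfold Spec_run_cycles; infer_instance

-- ===== CLAIM (what is proved, stated in full; the proofs are below) =====
def Claim_equal_run_cycles : Prop := ∀ (text : String), Dom_run_cycles text → Pre_run_cycles text → Spec_run_cycles text (run_cycles text)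

-- ===== LEMMAS AND PROOFS =====

-- loop invariant: A's fold extends the dict by exactly B's prefix-sum list,
-- keyed at consecutive cycles from c+1, starting the sum at x
lemma loopA_items (lines : List String) (d : PySem.Dict Int Int) (c x : Int)
    (hk : ∀ k ∈ d.keys, k < c + 1) (hp : ∀ l ∈ lines, preLine l = true) :
    (lines.foldl runStepA (d, c, x)).1.items = d.items ++ accumB (c + 1) x (deltasB lines) := by
  induction lines generalizing d c x with
  | nil => simp [deltasB, accumB]
  | cons line rest ih =>
      have hpl : preLine line = true := hp line (List.mem_cons_self ..)
      have hp' : ∀ l ∈ rest, preLine l = true := fun l hl => hp l (List.mem_cons_of_mem _ hl)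
      have hnc1 : d.contains (c + 1) = false := by
        cases hb : d.contains (c + 1) with
        | false => rfl
        | true =>
            have := hk _ ((PySem.Dict.contains_iff_mem_keys d (c + 1)).mp hb)
            omega
      rw [List.foldl_cons]
      cases hsp : PySem.Str.split₀ line with
      | nil =>
          have hstep : runStepA (d, c, x) line = (d, c, x) := by
            simp only [runStepA, hsp]
          have hv : deltasB (line :: rest) = deltasB rest := by
            simp only [deltasB, hsp]; simp
          rw [hstep, hv, ih d c x hk hp']
      | cons w ws =>
        cases ws with
        | nil =>
            by_cases hw : w = "noop"
            · have hstep : runStepA (d, c, x) line = (d.insert (c + 1) x, c + 1, x) := by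
                simp only [runStepA, hsp, hw]; simp
              have hv : deltasB (line :: rest) = 0 :: deltasB rest := by
                simp only [deltasB, hsp, hw]; simp
              rw [hstep, hv, ih (d.insert (c + 1) x) (c + 1) x ?_ hp']
              · rw [PySem.Dict.items_insert_of_not_contains _ _ hnc1]
                simp only [accumB, List.append_assoc, List.cons_append, List.nil_append]
                norm_num
              · intro k hkm
                rcases (PySem.Dict.mem_keys_insert _ _ _ _).mp hkm with h | h
                · omega
                · have := hk _ h; omega
            · have hstep : runStepA (d, c, x) line = (d, c, x) := by
                simp only [runStepA, hsp, if_neg hw]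
              have hv : deltasB (line :: rest) = deltasB rest := by
                simp only [deltasB, hsp]; simp [hw]
              rw [hstep, hv, ih d c x hk hp']
        | cons num ws2 =>
          cases ws2 with
          | nil =>
              have hne : ¬ ([w, num] = ["noop"]) := by simp
              by_cases hw : w = "addx"
              · cases hn : PySem.Int.ofStr? num with
                | some n =>
                    have hstep : runStepA (d, c, x) line =
                        ((d.insert (c + 1) x).insert (c + 2) (x + n), c + 2, x + n) := by
                      simp only [runStepA, hsp, hw, hn]; norm_num
                    have hv : deltasB (line :: rest) = 0 :: n :: deltasB rest := by
                      simp only [deltasB, hsp, hw, hn]; simp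
                    have hnc2 : (d.insert (c + 1) x).contains (c + 2) = false := by
                      cases hb : (d.insert (c + 1) x).contains (c + 2) with
                      | false => rfl
                      | true =>
                          rcases (PySem.Dict.mem_keys_insert _ _ _ _).mp
                              ((PySem.Dict.contains_iff_mem_keys _ _).mp hb) with h2 | h2
                          · omega
                          · have := hk _ h2; omega
                    rw [hstep, hv, ih ((d.insert (c + 1) x).insert (c + 2) (x + n)) (c + 2) (x + n) ?_ hp']
                    · rw [PySem.Dict.items_insert_of_not_contains _ _ hnc2,
                          PySem.Dict.items_insert_of_not_contains _ _ hnc1]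
                      simp only [accumB, List.append_assoc, List.cons_append, List.nil_append]
                      norm_num
                      constructor
                      · ring
                      · congr 1; ring
                    · intro k hkm
                      rcases (PySem.Dict.mem_keys_insert _ _ _ _).mp hkm with h2 | h2
                      · omega
                      · rcases (PySem.Dict.mem_keys_insert _ _ _ _).mp h2 with h3 | h3
                        · omega
                        · have := hk _ h3; omega
                | none =>
                    exfalso
                    rw [preLine, hsp, hw] at hpl
                    simp [hn] at hpl
              · have hstep : runStepA (d, c, x) line = (d, c, x) := by
                  simp only [runStepA, hsp, if_neg hw]
                have hv : deltasB (line :: rest) = deltasB rest := by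
                  simp only [deltasB, hsp, if_neg hne]; simp [hw]
                rw [hstep, hv, ih d c x hk hp']
          | cons u us =>
              have hstep : runStepA (d, c, x) line = (d, c, x) := by
                simp only [runStepA, hsp]
              have hv : deltasB (line :: rest) = deltasB rest := by
                have hne : ¬ (w :: num :: u :: us = ["noop"]) := by simp
                simp only [deltasB, hsp, if_neg hne]
              rw [hstep, hv, ih d c x hk hp']

-- ===== VERDICT (by name: the statement is the Claim_ definition above) =====
theorem run_cycles_spec : Claim_equal_run_cycles := by
  intro text _ hpre
  unfold Spec_run_cycles run_cycles run_cycles_alt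
  rw [loopA_items _ _ _ _ (by simp [PySem.Dict.keys_empty])
        (List.all_eq_true.mp hpre)]
  rfl
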